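-- pv_equiv track=rewrite | github.com/sfinktah/ComfyUI-Zluda | update-s.py | _find_marker_blocks
-- ===== SOURCE A (Python) =====
-- from typing import Iterable, List, Optional, Tuple
--
-- _BAT_MARKER_START = "-----BEGIN USER SECTION-----"
--
-- _BAT_MARKER_END = "-----END USER SECTION-----"
--
-- def _find_marker_blocks(lines: List[str]) -> List[Tuple[int, int]]:
--     """
--     Scan list of lines (with line endings preserved) and find non-nested
--     blocks delimited by start/end markers. Returns list of (start_idx, end_idx)
--     where indices refer to the marker lines themselves in 'lines'.
--     """
--     starts: List[int] = []
--     blocks: List[Tuple[int, int]] = []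
--     start_token = _BAT_MARKER_START.lower()
--     end_token = _BAT_MARKER_END.lower()
--     for i, ln in enumerate(lines):
--         low = ln.lower()
--         if start_token in low:
--             starts.append(i)
--         elif end_token in low and starts:
--             s = starts.pop(0)
--             blocks.append((s, i))
--     return blocks
-- ===== SOURCE B (Python) =====
-- from typing import List, Tuple
--
-- _BAT_MARKER_START = "-----BEGIN USER SECTION-----"
-- _BAT_MARKER_END = "-----END USER SECTION-----"
--
-- def _find_marker_blocks(lines: List[str]) -> List[Tuple[int, int]]:
--     """Index-table version: first classify every line into a start-index list
--     and an end-index list, then merge the two lists with a FIFO queue."""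
--     start_token = _BAT_MARKER_START.lower()
--     end_token = _BAT_MARKER_END.lower()
--     lows = [ln.lower() for ln in lines]
--     starts = [i for i, low in enumerate(lows) if start_token in low]
--     ends = [i for i, low in enumerate(lows)
--             if end_token in low and start_token not in low]
--     blocks: List[Tuple[int, int]] = []
--     queue: List[int] = []
--     for e in ends:
--         while starts and starts[0] < e:
--             queue.append(starts.pop(0))
--         if queue:
--             blocks.append((queue.pop(0), e))
--     return blocks
-- ===== Notes on version B (the rewrite author's own statement) =====
-- stated objective: alternative
-- what changed: A's single interleaved scan that classifies each line and matches it on the fly is replaced by building two comprehension-built index tables (start lines; end lines honoring the elif precedence) and then merging them in a separate pass with a FIFO queue.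
import Mathlib
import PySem

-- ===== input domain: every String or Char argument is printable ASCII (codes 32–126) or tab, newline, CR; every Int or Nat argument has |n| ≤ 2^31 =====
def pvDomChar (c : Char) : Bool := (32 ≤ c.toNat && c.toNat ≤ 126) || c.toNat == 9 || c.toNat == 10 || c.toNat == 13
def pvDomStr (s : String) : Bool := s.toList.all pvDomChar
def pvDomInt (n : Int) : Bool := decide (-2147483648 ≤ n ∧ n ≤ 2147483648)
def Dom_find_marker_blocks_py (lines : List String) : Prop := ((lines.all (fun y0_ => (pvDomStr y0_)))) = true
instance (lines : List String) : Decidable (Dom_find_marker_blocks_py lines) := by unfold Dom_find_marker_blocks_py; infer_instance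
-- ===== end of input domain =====

-- B replaces A's single interleaved classify-and-match scan by building start/end index
-- tables first and merging them with a FIFO queue (objective: alternative decomposition).

def pvStartTok : String := PySem.Str.lower "-----BEGIN USER SECTION-----"
def pvEndTok : String := PySem.Str.lower "-----END USER SECTION-----"

-- ===== PORT A =====
-- the body of A's for-loop: state = (starts, blocks)
def pvAStep (st : List Int × List (Int × Int)) (p : Int × String) : List Int × List (Int × Int) :=
  let low := PySem.Str.lower p.2
  if PySem.Str.isIn pvStartTok low then (st.1 ++ [p.1], st.2)
  else if PySem.Str.isIn pvEndTok low then
    match st.1 with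
    | [] => st                                  -- 'and starts' guard fails: no-op
    | s :: rest => (rest, st.2 ++ [(s, p.1)])   -- s = starts.pop(0); blocks.append((s, i))
  else st

def find_marker_blocks_py (lines : List String) : List (Int × Int) :=
  ((PySem.List.enumerate lines).foldl pvAStep ([], [])).2

-- ===== PORT B =====
def pvIsStart (low : String) : Bool := PySem.Str.isIn pvStartTok low
def pvIsEnd (low : String) : Bool := PySem.Str.isIn pvEndTok low && !(PySem.Str.isIn pvStartTok low)

-- Source B's inner while-loop: move every start index < e from 'starts' onto the queue
def pvMoveStarts (queue starts : List Int) (e : Int) : List Int × List Int :=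
  match starts with
  | [] => (queue, [])
  | s :: rest => if s < e then pvMoveStarts (queue ++ [s]) rest e else (queue, s :: rest)

-- Source B's for-loop over the end-index list
def pvMerge (queue starts : List Int) (ends : List Int) (blocks : List (Int × Int)) : List (Int × Int) :=
  match ends with
  | [] => blocks
  | e :: es =>
    let qs := pvMoveStarts queue starts e
    match qs.1 with
    | [] => pvMerge [] qs.2 es blocks
    | s :: qrest => pvMerge qrest qs.2 es (blocks ++ [(s, e)])

def find_marker_blocks_py_alt (lines : List String) : List (Int × Int) :=
  let lows := lines.map PySem.Str.lower
  let starts := (PySem.List.enumerate lows).filterMap (fun p => if pvIsStart p.2 then some p.1 else none)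
  let ends := (PySem.List.enumerate lows).filterMap (fun p => if pvIsEnd p.2 then some p.1 else none)
  pvMerge [] starts ends []

-- ===== PRECONDITION & SPEC =====
def Spec_find_marker_blocks_py (lines : List String) (out : List (Int × Int)) : Prop := out = find_marker_blocks_py_alt lines
instance (lines : List String) (out : List (Int × Int)) : Decidable (Spec_find_marker_blocks_py lines out) := by unfold Spec_find_marker_blocks_py; infer_instance

-- ===== CLAIM (what is proved, stated in full; the proofs are below) =====
def Claim_equal_find_marker_blocks_py : Prop := ∀ (lines : List String), Dom_find_marker_blocks_py lines → Spec_find_marker_blocks_py lines (find_marker_blocks_py lines)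

-- ===== LEMMAS AND PROOFS =====

-- start-index table of 'ls' enumerated from n (on the lowered lines)
def pvSof (ls : List String) (n : Int) : List Int :=
  (PySem.List.enumerate (ls.map PySem.Str.lower) n).filterMap (fun p => if pvIsStart p.2 then some p.1 else none)

def pvEof (ls : List String) (n : Int) : List Int :=
  (PySem.List.enumerate (ls.map PySem.Str.lower) n).filterMap (fun p => if pvIsEnd p.2 then some p.1 else none)

theorem pv_mem_ge (cond : String → Bool) (ls : List String) (n e : Int)
    (h : e ∈ (PySem.List.enumerate ls n).filterMap (fun p => if cond p.2 then some p.1 else none)) :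
    n ≤ e := by
  rcases List.mem_filterMap.1 h with ⟨p, hp, hf⟩
  rcases (PySem.List.mem_enumerate_iff _ _ _).1 hp with ⟨k, hk, rfl⟩
  split at hf
  · cases hf; omega
  · cases hf

theorem pvSof_ge (ls : List String) (n e : Int) (h : e ∈ pvSof ls n) : n ≤ e :=
  pv_mem_ge _ _ _ _ h

theorem pvEof_ge (ls : List String) (n e : Int) (h : e ∈ pvEof ls n) : n ≤ e :=
  pv_mem_ge _ _ _ _ h

theorem pvMoveStarts_stay (q S : List Int) (e : Int) (h : ∀ s ∈ S, ¬ s < e) :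
    pvMoveStarts q S e = (q, S) := by
  cases S with
  | nil => rfl
  | cons s rest =>
    have := h s (List.mem_cons_self ..)
    simp [pvMoveStarts, this]

theorem pvMerge_enq (q S E : List Int) (b : List (Int × Int)) (n : Int)
    (h : ∀ e ∈ E, n < e) :
    pvMerge q (n :: S) E b = pvMerge (q ++ [n]) S E b := by
  cases E with
  | nil => rfl
  | cons e es =>
    have hne := h e (List.mem_cons_self ..)
    simp [pvMerge, pvMoveStarts, hne]

theorem pv_main (ls : List String) : ∀ (n : Int) (q : List Int) (b : List (Int × Int)),
    ((PySem.List.enumerate ls n).foldl pvAStep (q, b)).2 = pvMerge q (pvSof ls n) (pvEof ls n) b := by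
  induction ls with
  | nil => intro n q b; simp [PySem.List.enumerate_nil, pvSof, pvEof, pvMerge]
  | cons l ls ih =>
    intro n q b
    have hS : ∀ s ∈ pvSof ls (n + 1), ¬ s < n := fun s hs => by
      have := pvSof_ge ls (n + 1) s hs; omega
    have hE : ∀ e ∈ pvEof ls (n + 1), n < e := fun e he => by
      have := pvEof_ge ls (n + 1) e he; omega
    by_cases hs : PySem.Chars.isIn pvStartTok.toList (PySem.Chars.lower l.toList) = true
    · have h1 : pvSof (l :: ls) n = n :: pvSof ls (n + 1) := by
        simp [pvSof, PySem.List.enumerate_cons, pvIsStart, hs]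
      have h2 : pvEof (l :: ls) n = pvEof ls (n + 1) := by
        simp [pvEof, PySem.List.enumerate_cons, pvIsEnd, hs]
      have h3 : pvAStep (q, b) (n, l) = (q ++ [n], b) := by
        simp [pvAStep, hs]
      rw [PySem.List.enumerate_cons, List.foldl_cons, h3, ih, h1, h2, pvMerge_enq _ _ _ _ _ hE]
    · rw [Bool.not_eq_true] at hs
      by_cases he : PySem.Chars.isIn pvEndTok.toList (PySem.Chars.lower l.toList) = true
      · have h1 : pvSof (l :: ls) n = pvSof ls (n + 1) := by
          simp [pvSof, PySem.List.enumerate_cons, pvIsStart, hs]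
        have h2 : pvEof (l :: ls) n = n :: pvEof ls (n + 1) := by
          simp [pvEof, PySem.List.enumerate_cons, pvIsEnd, hs, he]
        rw [PySem.List.enumerate_cons, List.foldl_cons, h1, h2]
        cases q with
        | nil =>
          have h3 : pvAStep ([], b) (n, l) = ([], b) := by
            simp [pvAStep, hs, he]
          rw [h3, ih]
          simp [pvMerge, pvMoveStarts_stay _ _ _ hS]
        | cons s qrest =>
          have h3 : pvAStep (s :: qrest, b) (n, l) = (qrest, b ++ [(s, n)]) := by
            simp [pvAStep, hs, he]
          rw [h3, ih]
          simp [pvMerge, pvMoveStarts_stay _ _ _ hS]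
      · rw [Bool.not_eq_true] at he
        have h1 : pvSof (l :: ls) n = pvSof ls (n + 1) := by
          simp [pvSof, PySem.List.enumerate_cons, pvIsStart, hs]
        have h2 : pvEof (l :: ls) n = pvEof ls (n + 1) := by
          simp [pvEof, PySem.List.enumerate_cons, pvIsEnd, he]
        have h3 : pvAStep (q, b) (n, l) = (q, b) := by
          simp [pvAStep, hs, he]
        rw [PySem.List.enumerate_cons, List.foldl_cons, h3, ih, h1, h2]

-- ===== VERDICT (by name: the statement is the Claim_ definition above) =====
theorem find_marker_blocks_py_spec : Claim_equal_find_marker_blocks_py := by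
  intro lines _
  show find_marker_blocks_py lines = find_marker_blocks_py_alt lines
  rw [find_marker_blocks_py, find_marker_blocks_py_alt, pv_main]
  rfl
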